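-- pv_equiv track=rewrite | github.com/eden12399/code | scr/a.py | _preparse_int
-- ===== SOURCE A (Python) =====
-- def _preparse_int(argv, keys, default):
--     """ Helper to extract integer args before full argparse """
--     val = None
--     for i, a in enumerate(argv):
--         if a in keys and i+1 < len(argv):
--             try:
--                 val = int(argv[i+1])
--             except Exception:
--                 pass
--     return val if val is not None else default
-- ===== SOURCE B (Python) =====
-- def _preparse_int(argv, keys, default):
--     """ Helper to extract integer args before full argparse """
--     for i in range(len(argv) - 2, -1, -1):
--         if argv[i] in keys:
--             try:
--                 return int(argv[i + 1])
--             except Exception: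
--                 pass
--     return default
-- ===== Notes on version B (the rewrite author's own statement) =====
-- stated objective: alternative
-- what changed: B scans argv backwards and returns at the first key whose following token parses as an int, instead of A's forward loop that keeps overwriting a last-success accumulator.
import Mathlib
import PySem

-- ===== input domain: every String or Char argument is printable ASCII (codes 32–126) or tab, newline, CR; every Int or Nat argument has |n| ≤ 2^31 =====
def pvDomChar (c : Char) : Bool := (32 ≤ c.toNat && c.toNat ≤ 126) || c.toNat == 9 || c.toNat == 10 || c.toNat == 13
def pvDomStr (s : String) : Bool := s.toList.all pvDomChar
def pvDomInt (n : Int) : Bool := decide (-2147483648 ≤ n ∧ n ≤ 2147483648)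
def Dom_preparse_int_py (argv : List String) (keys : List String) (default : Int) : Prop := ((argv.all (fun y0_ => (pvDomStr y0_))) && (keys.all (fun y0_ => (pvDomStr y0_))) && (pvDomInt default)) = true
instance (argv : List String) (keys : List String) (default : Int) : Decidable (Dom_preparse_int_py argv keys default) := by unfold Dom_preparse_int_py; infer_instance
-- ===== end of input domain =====

-- B scans argv backwards and returns at the first key whose next token parses as an int (alternative traversal; same cost).


-- ===== PORT A =====
def preparse_int_py (argv : List String) (keys : List String) (default : Int) : Int :=
  let val : Option Int :=
    (PySem.List.enumerate argv 0).foldl (fun val p =>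
      if p.2 ∈ keys ∧ p.1 + 1 < (argv.length : Int) then
        match (PySem.List.pyGet? argv (p.1 + 1)).bind PySem.Int.ofStr? with
        | some v => some v
        | none => val
      else val) none
  val.getD default

-- ===== PORT B =====
-- reverse index scan: parameter m means "next index to examine is m - 1"
def pvScan (argv : List String) (keys : List String) : Nat → Option Int
  | 0 => none
  | Nat.succ i =>
    match PySem.List.pyGet? argv (i : Int) with
    | some a =>
      if a ∈ keys then
        match (PySem.List.pyGet? argv ((i : Int) + 1)).bind PySem.Int.ofStr? with
        | some v => some v
        | none => pvScan argv keys i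
      else pvScan argv keys i
    | none => pvScan argv keys i

def preparse_int_py_alt (argv : List String) (keys : List String) (default : Int) : Int :=
  (pvScan argv keys (argv.length - 1)).getD default

-- ===== PRECONDITION & SPEC =====
def Spec_preparse_int_py (argv : List String) (keys : List String) (default : Int) (out : Int) : Prop := out = preparse_int_py_alt argv keys default
instance (argv : List String) (keys : List String) (default : Int) (out : Int) : Decidable (Spec_preparse_int_py argv keys default out) := by unfold Spec_preparse_int_py; infer_instance

-- ===== CLAIM (what is proved, stated in full; the proofs are below) =====
def Claim_equal_preparse_int_py : Prop := ∀ (argv : List String) (keys : List String) (default : Int), Dom_preparse_int_py argv keys default → Spec_preparse_int_py argv keys default (preparse_int_py argv keys default)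

-- ===== LEMMAS AND PROOFS =====

-- the "successful hit" at an enumerated position
def pvHit (argv : List String) (keys : List String) (p : Int × String) : Option Int :=
  if p.2 ∈ keys ∧ p.1 + 1 < (argv.length : Int) then
    (PySem.List.pyGet? argv (p.1 + 1)).bind PySem.Int.ofStr?
  else none

theorem pvFold_eq (argv keys : List String) (L : List (Int × String)) (val : Option Int) :
    L.foldl (fun val p =>
      if p.2 ∈ keys ∧ p.1 + 1 < (argv.length : Int) then
        match (PySem.List.pyGet? argv (p.1 + 1)).bind PySem.Int.ofStr? with
        | some v => some v
        | none => val
      else val) val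
    = (L.reverse.findSome? (pvHit argv keys)).or val := by
  induction L generalizing val with
  | nil => simp
  | cons p L ih =>
    simp only [List.foldl_cons, ih, List.reverse_cons, List.findSome?_append]
    have hstep : (if p.2 ∈ keys ∧ p.1 + 1 < (argv.length : Int) then
        match (PySem.List.pyGet? argv (p.1 + 1)).bind PySem.Int.ofStr? with
        | some v => some v
        | none => val
      else val) = (pvHit argv keys p).or val := by
      unfold pvHit
      split
      · cases (PySem.List.pyGet? argv (p.1 + 1)).bind PySem.Int.ofStr? <;> simp [Option.or]
      · simp
    rw [hstep]
    cases h2 : pvHit argv keys p <;> cases h1 : L.reverse.findSome? (pvHit argv keys) <;>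
      simp [List.findSome?, Option.or, h2]

theorem pvScan_eq (argv keys : List String) (m : Nat) (hm : m ≤ argv.length) :
    pvScan argv keys m
      = (((PySem.List.enumerate argv 0).take m).reverse).findSome? (pvHit argv keys) := by
  induction m with
  | zero => simp [pvScan]
  | succ i ih =>
    have hi : i < argv.length := hm
    have htake : (PySem.List.enumerate argv 0).take (i + 1)
        = (PySem.List.enumerate argv 0).take i ++ [((i : Int), argv[i])] := by
      rw [List.take_add_one]
      have : (PySem.List.enumerate argv 0)[i]? = some ((i : Int), argv[i]) := by
        rw [List.getElem?_eq_getElem (by simpa using hi)]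
        simp [PySem.List.getElem_enumerate]
      simp [this]
    rw [htake, List.reverse_append]
    simp only [List.reverse_singleton, List.singleton_append, List.findSome?_cons]
    have hget : PySem.List.pyGet? argv (i : Int) = some argv[i] := by
      simp [PySem.List.pyGet?_natCast, List.getElem?_eq_getElem hi]
    show pvScan argv keys (i + 1) = _
    rw [pvScan, hget]
    by_cases hk : argv[i] ∈ keys
    · simp only [hk, if_pos]
      unfold pvHit
      by_cases hlt : ((i : Int) + 1) < (argv.length : Int)
      · simp only [hk, hlt, and_self, if_pos]
        cases hv : (PySem.List.pyGet? argv ((i : Int) + 1)).bind PySem.Int.ofStr? with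
        | some v => simp
        | none => simpa using ih (Nat.le_of_lt hi)
      · have hnone : PySem.List.pyGet? argv ((i : Int) + 1) = none := by
          rw [PySem.List.pyGet?_eq_none_iff]
          intro hr
          rcases hr with ⟨_, h2⟩
          omega
        rw [hnone]
        simp only [Option.bind_none]
        have : ¬ (argv[i] ∈ keys ∧ (i : Int) + 1 < (argv.length : Int)) := by tauto
        rw [if_neg this]
        simpa using ih (Nat.le_of_lt hi)
    · simp only [hk, if_neg, not_false_iff]
      unfold pvHit
      have : ¬ (argv[i] ∈ keys ∧ (i : Int) + 1 < (argv.length : Int)) := by tauto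
      rw [if_neg this]
      simpa using ih (Nat.le_of_lt hi)

-- the top index (len-1) can never hit (i+1 would be out of range), so the scan may start one lower
theorem pvScan_top (argv keys : List String) :
    pvScan argv keys argv.length = pvScan argv keys (argv.length - 1) := by
  cases h : argv.length with
  | zero => simp
  | succ n =>
    have hn : n < argv.length := by omega
    have hget : PySem.List.pyGet? argv (n : Int) = some argv[n] := by
      simp [PySem.List.pyGet?_natCast, List.getElem?_eq_getElem hn]
    have hnone : PySem.List.pyGet? argv ((n : Int) + 1) = none := by
      rw [PySem.List.pyGet?_eq_none_iff]
      intro hr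
      rcases hr with ⟨_, h2⟩
      omega
    rw [pvScan, hget]
    by_cases hk : argv[n] ∈ keys
    · simp [hk, hnone]
    · simp [hk]

-- ===== VERDICT (by name: the statement is the Claim_ definition above) =====
theorem preparse_int_py_spec : Claim_equal_preparse_int_py := by
  intro argv keys default _
  unfold Spec_preparse_int_py preparse_int_py preparse_int_py_alt
  rw [pvFold_eq]
  have h1 := pvScan_eq argv keys argv.length (le_refl _)
  rw [List.take_of_length_le (by simp [PySem.List.length_enumerate])] at h1
  rw [← h1, pvScan_top]
  cases pvScan argv keys (argv.length - 1) <;> simp [Option.or]
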